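-- pv_equiv track=rewrite | github.com/epibook/epibook.github.io | static/python/bonus_improved.py | calculate_bonus
-- ===== SOURCE A (Python) =====
-- def calculate_bonus(productivity):
--     # Initially assigns one ticket to everyone.
--     tickets = [1] * len(productivity)
--     # From left to right.
--     for i in range(1, len(productivity)):
--         if productivity[i] > productivity[i - 1]:
--             tickets[i] = tickets[i - 1] + 1
--     # From right to left.
--     for i in reversed(range(len(productivity) - 1)):
--         if productivity[i] > productivity[i + 1]:
--             tickets[i] = max(tickets[i], tickets[i + 1] + 1)
--     return tickets
-- ===== SOURCE B (Python) =====
-- def calculate_bonus(productivity):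
--     n = len(productivity)
--
--     def inc_run(i):
--         # length of the strictly increasing run ending at i
--         k = 1
--         while k <= i and productivity[i - k] < productivity[i - k + 1]:
--             k += 1
--         return k
--
--     def dec_run(i):
--         # length of the strictly decreasing run starting at i
--         k = 1
--         while i + k < n and productivity[i + k] < productivity[i + k - 1]:
--             k += 1
--         return k
--
--     return [max(inc_run(i), dec_run(i)) for i in range(n)]
-- ===== Notes on version B (the rewrite author's own statement) =====
-- stated objective: alternative
-- what changed: replaces A's two in-place sweep passes over a shared tickets array by a per-index closed form: each bonus is computed independently as the longer of the strictly increasing run ending at i and the strictly decreasing run starting at i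
import Mathlib
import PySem

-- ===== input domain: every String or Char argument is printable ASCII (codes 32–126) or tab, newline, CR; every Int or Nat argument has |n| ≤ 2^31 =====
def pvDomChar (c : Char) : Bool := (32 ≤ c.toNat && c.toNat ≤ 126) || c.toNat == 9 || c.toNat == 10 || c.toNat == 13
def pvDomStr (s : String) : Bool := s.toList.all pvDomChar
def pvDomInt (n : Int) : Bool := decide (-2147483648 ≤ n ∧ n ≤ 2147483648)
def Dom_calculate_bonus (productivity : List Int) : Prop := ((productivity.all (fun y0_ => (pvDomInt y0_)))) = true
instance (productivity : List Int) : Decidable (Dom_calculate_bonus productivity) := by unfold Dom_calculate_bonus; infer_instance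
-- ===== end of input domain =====

-- B replaces A's two in-place sweep passes by a per-index closed form (each bonus is the
-- longer of the strictly increasing run ending at i and the strictly decreasing run
-- starting at i); objective: alternative (not faster — O(n^2) worst case vs A's O(n)).

-- ===== PORT A =====
-- `for i in range(1, len(productivity)): if productivity[i] > productivity[i-1]: tickets[i] = tickets[i-1] + 1`
def pass1A (p : List Int) (t : List Int) (i : Nat) : List Int :=
  if i < p.length then
    pass1A p (if p.getD i 0 > p.getD (i - 1) 0 then t.set i (t.getD (i - 1) 0 + 1) else t) (i + 1)
  else t
termination_by p.length - i

-- `for i in reversed(range(len(productivity) - 1)): ...`; argument k = number of indices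
-- still to process, so the index handled in the step case is k (counting n-2 down to 0).
def pass2A (p : List Int) (t : List Int) : Nat → List Int
  | 0 => t
  | k + 1 =>
      pass2A p
        (if p.getD k 0 > p.getD (k + 1) 0 then t.set k (max (t.getD k 0) (t.getD (k + 1) 0 + 1)) else t) k

def calculate_bonus (productivity : List Int) : List Int :=
  pass2A productivity (pass1A productivity (List.replicate productivity.length 1) 1)
    (productivity.length - 1)

-- ===== PORT B =====
-- `while k <= i and productivity[i-k] < productivity[i-k+1]: k += 1` (indices in range, so getD is exact)
def incGo (p : List Int) (i k : Nat) : Nat :=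
  if k ≤ i ∧ p.getD (i - k) 0 < p.getD (i - k + 1) 0 then incGo p i (k + 1) else k
termination_by i + 1 - k

def incRun (p : List Int) (i : Nat) : Nat := incGo p i 1

-- `while i + k < n and productivity[i+k] < productivity[i+k-1]: k += 1`
def decGo (p : List Int) (i k : Nat) : Nat :=
  if i + k < p.length ∧ p.getD (i + k) 0 < p.getD (i + k - 1) 0 then decGo p i (k + 1) else k
termination_by p.length - (i + k)

def decRun (p : List Int) (i : Nat) : Nat := decGo p i 1

def calculate_bonus_alt (productivity : List Int) : List Int :=
  (List.range productivity.length).map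
    (fun i => max ((incRun productivity i : Nat) : Int) ((decRun productivity i : Nat) : Int))

-- ===== PRECONDITION & SPEC =====
def Spec_calculate_bonus (productivity : List Int) (out : List Int) : Prop := out = calculate_bonus_alt productivity
instance (productivity : List Int) (out : List Int) : Decidable (Spec_calculate_bonus productivity out) := by unfold Spec_calculate_bonus; infer_instance

-- ===== CLAIM (what is proved, stated in full; the proofs are below) =====
def Claim_equal_calculate_bonus : Prop := ∀ (productivity : List Int), Dom_calculate_bonus productivity → Spec_calculate_bonus productivity (calculate_bonus productivity)

-- ===== LEMMAS AND PROOFS =====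

theorem getD_set_ne (t : List Int) (i m : Nat) (v : Int) (h : m ≠ i) :
    (t.set i v).getD m 0 = t.getD m 0 := by
  simp [List.getD, List.getElem?_set_ne (Ne.symm h)]

theorem getD_set_self (t : List Int) (i : Nat) (v : Int) (h : i < t.length) :
    (t.set i v).getD i 0 = v := by
  simp [List.getD, h]

theorem incGo_shift (p : List Int) (i k : Nat) :
    incGo p (i + 1) (k + 1) = incGo p i k + 1 := by
  fun_induction incGo p i k with
  | case1 k hc ih =>
      rw [incGo]
      have h1 : i + 1 - (k + 1) = i - k := by omega
      have h2 : k + 1 ≤ i + 1 := by omega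
      simp only [h1, h2, true_and]
      rw [if_pos hc.2, ih, incGo]
  | case2 k hc =>
      rw [incGo, incGo]
      have h1 : i + 1 - (k + 1) = i - k := by omega
      simp only [h1]
      rw [if_neg (fun h => hc ⟨by omega, h.2⟩)]

theorem le_incGo (p : List Int) (i k : Nat) : k ≤ incGo p i k := by
  fun_induction incGo p i k with
  | case1 k hc ih => omega
  | case2 k hc => exact Nat.le_refl _

theorem incRun_zero (p : List Int) : incRun p 0 = 1 := by
  rw [incRun, incGo]; simp

theorem incRun_succ (p : List Int) (i : Nat) :
    incRun p (i + 1) = if p.getD i 0 < p.getD (i + 1) 0 then incRun p i + 1 else 1 := by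
  rw [incRun, incGo]
  have h1 : i + 1 - 1 = i := by omega
  simp only [h1, Nat.le_add_left, true_and]
  split
  · exact incGo_shift p i 1
  · rfl

theorem decGo_shift (p : List Int) (i k : Nat) :
    decGo p i (k + 1) = decGo p (i + 1) k + 1 := by
  fun_induction decGo p (i + 1) k with
  | case1 k hc ih =>
      rw [decGo]
      have h1 : i + (k + 1) = i + 1 + k := by omega
      simp only [h1]
      rw [if_pos hc, ih, decGo]
  | case2 k hc =>
      rw [decGo, decGo]
      have h1 : i + (k + 1) = i + 1 + k := by omega
      simp only [h1]
      rw [if_neg hc]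

theorem le_decGo (p : List Int) (i k : Nat) : k ≤ decGo p i k := by
  fun_induction decGo p i k with
  | case1 k hc ih => omega
  | case2 k hc => exact Nat.le_refl _

theorem decRun_spec (p : List Int) (i : Nat) :
    decRun p i =
      if i + 1 < p.length ∧ p.getD (i + 1) 0 < p.getD i 0 then decRun p (i + 1) + 1 else 1 := by
  rw [decRun, decGo]
  have h1 : i + 1 - 1 = i := by omega
  simp only [h1]
  split
  · exact decGo_shift p i 1
  · rfl

theorem pass1A_spec (p : List Int) : ∀ j t, 1 ≤ j → t.length = p.length →
    (∀ m, m < j → m < p.length → t.getD m 0 = ((incRun p m : Nat) : Int)) →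
    (∀ m, j ≤ m → m < p.length → t.getD m 0 = 1) →
    (pass1A p t j).length = p.length ∧
      ∀ m, m < p.length → (pass1A p t j).getD m 0 = ((incRun p m : Nat) : Int) := by
  intro j t hj hlen h1 h2
  fun_induction pass1A p t j with
  | case1 t j hlt ih =>
      simp only [dite_eq_ite] at ih
      apply ih (by omega)
      · split <;> simp [hlen]
      · intro m hmj hmn
        rcases Nat.lt_or_ge m j with hm | hm
        · have : t.getD m 0 = ((incRun p m : Nat) : Int) := h1 m hm hmn
          split <;> [rw [getD_set_ne t j m _ (by omega)]; skip] <;> exact this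
        · -- m = j
          have hmj' : m = j := by omega
          subst hmj'
          obtain ⟨j', rfl⟩ : ∃ j', m = j' + 1 := ⟨m - 1, by omega⟩
          have hstep := incRun_succ p j'
          have hj1 : j' + 1 - 1 = j' := by omega
          split
          · rename_i hgt
            rw [getD_set_self _ _ _ (by omega), hj1, h1 j' (by omega) (by omega), hstep,
                if_pos (by simpa [hj1] using hgt)]
            push_cast; ring
          · rename_i hgt
            rw [h2 _ (Nat.le_refl _) hmn, hstep, if_neg (by simpa [hj1] using hgt)]
            simp
      · intro m hm hmn
        have hne : m ≠ j := by omega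
        split <;> [rw [getD_set_ne t j m _ hne]; skip] <;> exact h2 m (by omega) hmn
  | case2 t j hlt =>
      exact ⟨hlen, fun m hmn => h1 m (by omega) hmn⟩

theorem pass2A_spec (p : List Int) : ∀ k t, (k = 0 ∨ k < p.length) → t.length = p.length →
    (∀ m, m < k → t.getD m 0 = ((incRun p m : Nat) : Int)) →
    (∀ m, k ≤ m → m < p.length →
      t.getD m 0 = max ((incRun p m : Nat) : Int) ((decRun p m : Nat) : Int)) →
    (pass2A p t k).length = p.length ∧
      ∀ m, m < p.length →
        (pass2A p t k).getD m 0 = max ((incRun p m : Nat) : Int) ((decRun p m : Nat) : Int) := by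
  intro k t hk hlen h1 h2
  fun_induction pass2A p t k with
  | case1 t =>
      exact ⟨hlen, fun m hmn => h2 m (by omega) hmn⟩
  | case2 t k ih =>
      have hkn : k + 1 < p.length := by omega
      apply ih (by omega)
      · split <;> simp [hlen]
      · intro m hmk
        split <;> [rw [getD_set_ne t k m _ (by omega)]; skip] <;> exact h1 m (by omega)
      · intro m hm hmn
        rcases Nat.lt_or_ge k m with hgt | hge
        · split <;> [rw [getD_set_ne t k m _ (by omega)]; skip] <;> exact h2 m (by omega) hmn
        · have hmk : m = k := by omega
          subst hmk
          have hik : t.getD m 0 = ((incRun p m : Nat) : Int) := h1 m (by omega)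
          split
          · rename_i hc
            rw [getD_set_self _ _ _ (by omega), hik, h2 (m + 1) (by omega) (by omega)]
            have hinc1 : incRun p (m + 1) = 1 := by
              rw [incRun_succ, if_neg (by exact fun h => absurd hc (by omega))]
            have hdec : decRun p m = decRun p (m + 1) + 1 := by
              rw [decRun_spec p m, if_pos ⟨by omega, hc⟩]
            have hd1 : 1 ≤ decRun p (m + 1) := le_decGo p (m + 1) 1
            rw [hinc1, hdec]
            push_cast
            omega
          · rename_i hc
            rw [hik]
            have hdec : decRun p m = 1 := by
              rw [decRun_spec p m, if_neg (fun h => hc h.2)]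
            have hi1 : 1 ≤ incRun p m := le_incGo p m 1
            rw [hdec]
            push_cast
            omega

-- ===== VERDICT (by name: the statement is the Claim_ definition above) =====
theorem calculate_bonus_spec : Claim_equal_calculate_bonus := by
  intro p _
  show calculate_bonus p = calculate_bonus_alt p
  have hrep : ∀ m : Nat, m < p.length → (List.replicate p.length (1 : Int)).getD m 0 = 1 := by
    intro m hm
    simp [List.getD, hm]
  obtain ⟨hl1, hv1⟩ := pass1A_spec p 1 (List.replicate p.length 1) (Nat.le_refl 1) (by simp)
    (fun m hm hmn => by interval_cases m; rw [hrep 0 hmn, incRun_zero]; simp)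
    (fun m _ hmn => hrep m hmn)
  obtain ⟨hl2, hv2⟩ := pass2A_spec p (p.length - 1) _ (by omega) hl1
    (fun m hm => hv1 m (by omega))
    (fun m hm hmn => by
      rw [hv1 m hmn]
      have hdec : decRun p m = 1 := by
        rw [decRun_spec, if_neg (fun h => absurd h.1 (by omega))]
      have hi1 := le_incGo p m 1
      rw [hdec]
      have : ((1 : Nat) : Int) ≤ ((incRun p m : Nat) : Int) := by exact_mod_cast hi1
      simp only [Nat.cast_one]
      omega)
  unfold calculate_bonus
  apply List.ext_getElem
  · rw [hl2]
    simp [calculate_bonus_alt]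
  · intro i hi1 hi2
    have hin : i < p.length := by rwa [hl2] at hi1
    have hv := hv2 i hin
    rw [List.getD_eq_getElem _ _ hi1] at hv
    rw [hv]
    simp [calculate_bonus_alt, incRun, decRun]
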